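-- pv_equiv track=rewrite | github.com/erwanvivien/JPEG_compression | compress.py | huffman_category
-- ===== SOURCE A (Python) =====
-- def huffman_category(n):
--     absN = abs(n)
--     if absN <= 1:
--         return absN
--
--     inf, sup = 2, 4
--     for i in range(1, 16):
--         if absN >= inf and absN < sup:
--             return i + 1
--         inf, sup = sup, sup * 2
-- ===== SOURCE B (Python) =====
-- def huffman_category(n):
--     bl = abs(n).bit_length()
--     if bl <= 16:
--         return bl
--     return None
-- ===== Notes on version B (the rewrite author's own statement) =====
-- stated objective: idiomatic
-- what changed: Replaces the doubling-interval scan loop with a single closed-form abs(n).bit_length() call, returning None exactly where A falls off its loop (abs(n) >= 65536).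
-- outside the precondition, e.g. on huffman_category(65536): A returns None, B returns None
import Mathlib
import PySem

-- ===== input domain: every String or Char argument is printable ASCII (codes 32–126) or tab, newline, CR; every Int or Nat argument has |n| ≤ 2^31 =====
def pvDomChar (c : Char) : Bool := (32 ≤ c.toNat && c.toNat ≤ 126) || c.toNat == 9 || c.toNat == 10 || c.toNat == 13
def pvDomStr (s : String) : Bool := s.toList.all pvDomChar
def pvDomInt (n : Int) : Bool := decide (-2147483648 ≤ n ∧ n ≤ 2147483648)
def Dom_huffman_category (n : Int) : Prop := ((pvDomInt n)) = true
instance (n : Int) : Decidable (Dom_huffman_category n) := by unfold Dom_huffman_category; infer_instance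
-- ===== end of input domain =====

-- ===== PORT A =====
-- B replaces A's doubling-interval loop with a closed-form bit_length call (idiomatic; return-value equivalence on Pre_).
def huffman_loop (absN inf sup i : Int) : Int :=
  if _h : i < 16 then
    if absN ≥ inf ∧ absN < sup then i + 1
    else huffman_loop absN sup (sup * 2) (i + 1)
  else 0  -- Python falls off the loop and returns None here; excluded by Pre_
termination_by (16 - i).toNat
decreasing_by omega

def huffman_category (n : Int) : Int :=
  let absN := |n|
  if absN ≤ 1 then absN
  else huffman_loop absN 2 4 1

-- ===== PORT B =====
def huffman_category_alt (n : Int) : Int :=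
  let bl : Nat := n.natAbs.size  -- abs(n).bit_length()
  if bl ≤ 16 then (bl : Int) else 0  -- Python returns None here; excluded by Pre_

-- ===== PRECONDITION & SPEC =====
-- Pre_ excludes |n| ≥ 65536, on which A falls off its loop and returns None, not an int of the declared type.
def Pre_huffman_category (n : Int) : Prop := n.natAbs < 65536
instance (n : Int) : Decidable (Pre_huffman_category n) := by unfold Pre_huffman_category; infer_instance
def pvWitness_huffman_category : Int := 7
def Spec_huffman_category (n : Int) (out : Int) : Prop := out = huffman_category_alt n
instance (n : Int) (out : Int) : Decidable (Spec_huffman_category n out) := by unfold Spec_huffman_category; infer_instance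

-- ===== CLAIM (what is proved, stated in full; the proofs are below) =====
def Claim_equal_huffman_category : Prop := ∀ (n : Int), Dom_huffman_category n → Pre_huffman_category n → Spec_huffman_category n (huffman_category n)

-- ===== LEMMAS AND PROOFS =====
lemma huffman_loop_eq (k : Nat) : ∀ j : Nat, 16 - j = k → 1 ≤ j → ∀ m : Nat, 2 ^ j ≤ m → m < 2 ^ 16 →
    huffman_loop (m : Int) ((2 ^ j : Nat) : Int) ((2 ^ (j + 1) : Nat) : Int) (j : Int) = (m.size : Int) := by
  induction k with
  | zero =>
    intro j hk _ m hlo hhi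
    exfalso
    have : (2 : Nat) ^ j < 2 ^ 16 := lt_of_le_of_lt hlo hhi
    have hj : j < 16 := (Nat.pow_lt_pow_iff_right (by omega)).mp this
    omega
  | succ k ih =>
    intro j hk hj1 m hlo hhi
    have hjlt : j < 16 := by
      have : (2 : Nat) ^ j < 2 ^ 16 := lt_of_le_of_lt hlo hhi
      exact (Nat.pow_lt_pow_iff_right (by omega)).mp this
    rw [huffman_loop]
    rw [dif_pos (by exact_mod_cast hjlt)]
    by_cases hcase : m < 2 ^ (j + 1)
    · rw [if_pos (by constructor <;> [exact_mod_cast hlo; exact_mod_cast hcase])]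
      have hs1 : m.size ≤ j + 1 := Nat.size_le.mpr hcase
      have hs2 : j < m.size := Nat.lt_size.mpr hlo
      have : m.size = j + 1 := by omega
      rw [this]; push_cast; ring
    · rw [Nat.not_lt] at hcase
      rw [if_neg (by rintro ⟨-, h2⟩; exact absurd (show m < 2 ^ (j + 1) by exact_mod_cast h2) (by omega))]
      have hmul : ((2 ^ (j + 1) : Nat) : Int) * 2 = ((2 ^ (j + 1 + 1) : Nat) : Int) := by
        push_cast; ring
      have hji : ((j : Int) + 1) = ((j + 1 : Nat) : Int) := by push_cast; ring
      rw [hmul, hji]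
      exact ih (j + 1) (by omega) (by omega) m hcase hhi

lemma size_le_16 (m : Nat) (h : m < 65536) : m.size ≤ 16 := Nat.size_le.mpr (by omega)

-- ===== VERDICT (by name: the statement is the Claim_ definition above) =====
theorem huffman_category_spec : Claim_equal_huffman_category := by
  intro n _ hpre
  unfold Spec_huffman_category huffman_category huffman_category_alt
  have habs : |n| = (n.natAbs : Int) := Int.abs_eq_natAbs n
  set m := n.natAbs with hm
  rw [if_pos (size_le_16 m hpre)]
  by_cases h1 : m ≤ 1
  · rw [habs, if_pos (by exact_mod_cast h1)]
    interval_cases m <;> simp [Nat.size]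
  · rw [Nat.not_le] at h1
    rw [habs, if_neg (by exact_mod_cast Nat.not_le.mpr h1)]
    have := huffman_loop_eq 15 1 rfl le_rfl m (by omega) (by unfold Pre_huffman_category at hpre; omega)
    simpa using this
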